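-- pv_equiv track=rewrite | github.com/TOJSSE-iData/DSESL | struct_gnn/meta_path.py | meta_paths_from
-- ===== SOURCE A (Python) =====
-- from typing import Dict, List, Tuple, Set, Union
-- import itertools
--
-- def meta_paths_from(entity_list: List[int], relation_lists: List[Union[List[int], Set[int]]]) -> List[Tuple]:
--     result = []
--     for _relations in itertools.product(*relation_lists):
--         _meta_path = [entity_list[0]]
--         for i, _relation in enumerate(_relations):
--             _meta_path.extend([_relation, entity_list[i + 1]])
--         result.append(tuple(_meta_path))
--     return result
-- ===== SOURCE B (Python) =====
-- from typing import Dict, List, Tuple, Set, Union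
--
--
-- def meta_paths_from(entity_list, relation_lists):
--     # Right-to-left dynamic programming on path suffixes: each level extends
--     # every already-built suffix path with one relation and its entity, so the
--     # output is assembled back-to-front and no relation-tuple product is built.
--     if any(len(rl) == 0 for rl in relation_lists):
--         return []
--     tails = [()]
--     for rl, e in reversed(list(zip(relation_lists, entity_list[1:]))):
--         tails = [(r, e) + t for r in rl for t in tails]
--     return [(entity_list[0],) + t for t in tails]
-- ===== Notes on version B (the rewrite author's own statement) =====
-- stated objective: alternative
-- what changed: Replaces itertools.product plus per-combination indexed path assembly by a right-to-left dynamic-programming fold that builds complete path suffixes back-to-front (no relation-tuple product is materialised), with an early [] return when some relation list is empty.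
import Mathlib
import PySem

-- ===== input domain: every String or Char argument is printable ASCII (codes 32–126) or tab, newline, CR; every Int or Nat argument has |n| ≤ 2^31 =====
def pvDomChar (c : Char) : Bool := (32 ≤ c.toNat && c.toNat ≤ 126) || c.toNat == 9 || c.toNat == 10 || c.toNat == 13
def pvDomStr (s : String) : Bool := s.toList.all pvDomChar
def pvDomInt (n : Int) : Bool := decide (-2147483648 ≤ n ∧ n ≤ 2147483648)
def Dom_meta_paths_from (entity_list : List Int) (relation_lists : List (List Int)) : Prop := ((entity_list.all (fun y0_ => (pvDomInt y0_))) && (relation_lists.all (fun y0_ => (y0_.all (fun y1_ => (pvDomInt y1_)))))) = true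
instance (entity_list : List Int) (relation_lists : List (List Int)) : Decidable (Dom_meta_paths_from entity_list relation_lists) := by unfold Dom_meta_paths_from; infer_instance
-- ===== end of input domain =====

-- B replaces itertools.product + indexed path assembly by a right-to-left DP on complete
-- path suffixes, building the output back-to-front (alternative decomposition, same cost).

-- ===== PORT A =====
-- itertools.product(*relation_lists): odometer order, last list varies fastest
def pyProduct : List (List Int) → List (List Int)
  | [] => [[]]
  | l :: ls => l.flatMap (fun r => (pyProduct ls).map (fun t => r :: t))

def meta_paths_from (entity_list : List Int) (relation_lists : List (List Int)) : List (List Int) :=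
  (pyProduct relation_lists).foldl
    (fun result rels =>
      let mp := (PySem.List.enumerate rels 0).foldl
        (fun mp p => mp ++ [p.2, PySem.List.pyGetD entity_list (p.1 + 1) 0])
        [PySem.List.pyGetD entity_list 0 0]
      result ++ [mp]) []

-- ===== PORT B =====
def meta_paths_from_alt (entity_list : List Int) (relation_lists : List (List Int)) : List (List Int) :=
  if relation_lists.any (fun rl => rl.length == 0) then []
  else
    let tails := ((relation_lists.zip (PySem.List.slice entity_list (some 1) none)).reverse).foldl
      (fun tails p => p.1.flatMap (fun r => tails.map (fun t => r :: p.2 :: t))) [[]]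
    tails.map (fun t => PySem.List.pyGetD entity_list 0 0 :: t)

-- ===== PRECONDITION & SPEC =====
-- Pre_ excludes exactly the inputs where A raises IndexError: when every relation list is
-- nonempty (so the product is nonempty), entity_list must have more elements than relation_lists.
def Pre_meta_paths_from (entity_list : List Int) (relation_lists : List (List Int)) : Prop :=
  (∀ l ∈ relation_lists, l ≠ []) → relation_lists.length + 1 ≤ entity_list.length
instance (entity_list : List Int) (relation_lists : List (List Int)) : Decidable (Pre_meta_paths_from entity_list relation_lists) := by unfold Pre_meta_paths_from; infer_instance
def pvWitness_meta_paths_from : List Int × List (List Int) := ([1, 2, 3], [[4, 5], [6]])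

def Spec_meta_paths_from (entity_list : List Int) (relation_lists : List (List Int)) (out : List (List Int)) : Prop := out = meta_paths_from_alt entity_list relation_lists
instance (entity_list : List Int) (relation_lists : List (List Int)) (out : List (List Int)) : Decidable (Spec_meta_paths_from entity_list relation_lists out) := by unfold Spec_meta_paths_from; infer_instance

-- ===== CLAIM (what is proved, stated in full; the proofs are below) =====
def Claim_equal_meta_paths_from : Prop := ∀ (entity_list : List Int) (relation_lists : List (List Int)), Dom_meta_paths_from entity_list relation_lists → Pre_meta_paths_from entity_list relation_lists → Spec_meta_paths_from entity_list relation_lists (meta_paths_from entity_list relation_lists)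

-- ===== LEMMAS AND PROOFS =====

lemma length_of_mem_pyProduct : ∀ {rls : List (List Int)} {c : List Int},
    c ∈ pyProduct rls → c.length = rls.length := by
  intro rls
  induction rls with
  | nil => intro c hc; simp [pyProduct] at hc; simp [hc]
  | cons l ls ih =>
    intro c hc
    simp only [pyProduct, List.mem_flatMap, List.mem_map] at hc
    obtain ⟨r, _, t, ht, rfl⟩ := hc
    simp [ih ht]

lemma pyProduct_eq_nil_of_mem_nil {rls : List (List Int)} (h : [] ∈ rls) :
    pyProduct rls = [] := by
  induction rls with
  | nil => simp at h
  | cons l ls ih =>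
    rcases List.mem_cons.mp h with rfl | h'
    · simp [pyProduct]
    · simp [pyProduct, ih h']

-- A's enumerate loop, characterised
lemma build_eq (el : List Int) : ∀ (c : List Int) (k : Nat) (mp : List Int),
    k + c.length + 1 ≤ el.length →
    (PySem.List.enumerate c (k : Int)).foldl
        (fun mp p => mp ++ [p.2, PySem.List.pyGetD el (p.1 + 1) 0]) mp
      = mp ++ ((el.drop (k + 1)).zip c).flatMap (fun p => [p.2, p.1]) := by
  intro c
  induction c with
  | nil => intro k mp _; simp [PySem.List.enumerate_nil]
  | cons r rs ih =>
    intro k mp hlen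
    have hk1 : k + 1 < el.length := by simp at hlen; omega
    have hdrop : el.drop (k + 1) = el[k + 1] :: el.drop (k + 2) :=
      List.drop_eq_getElem_cons hk1
    have hcast : ((k : Int) + 1) = ((k + 1 : Nat) : Int) := by push_cast; ring
    rw [PySem.List.enumerate_cons, List.foldl_cons, hcast,
      PySem.List.pyGetD_natCast, ih (k + 1) _ (by simp at hlen ⊢; omega), hdrop]
    simp only [List.getD_eq_getElem?_getD, List.getElem?_eq_getElem hk1, Option.getD_some,
      List.append_assoc, List.cons_append, List.nil_append]
    rw [show k + 1 + 1 = k + 2 by omega]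
    simp only [List.zip_cons_cons, List.flatMap_cons, List.cons_append, List.nil_append]

-- B's right-to-left fold over (relation list, entity) pairs equals the product mapped
-- through the suffix interleaving
lemma tails_eq : ∀ (rls : List (List Int)) (el : List Int),
    rls.length + 1 ≤ el.length →
    ((rls.zip (el.drop 1)).reverse).foldl
        (fun tails p => p.1.flatMap (fun r => tails.map (fun t => r :: p.2 :: t))) [[]]
      = (pyProduct rls).map (fun c => ((el.drop 1).zip c).flatMap (fun p => [p.2, p.1])) := by
  intro rls
  induction rls with
  | nil => intro el _; simp [pyProduct]
  | cons l ls ih =>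
    intro el hlen
    have h1 : 1 < el.length := by simp at hlen; omega
    have hdrop : el.drop 1 = el[1] :: el.drop 2 := List.drop_eq_getElem_cons h1
    have hdd : (el.drop 1).drop 1 = el.drop 2 := by simp
    have ihe := ih (el.drop 1) (by simp at hlen ⊢; omega)
    rw [hdd] at ihe
    rw [hdrop, List.zip_cons_cons, List.reverse_cons, List.foldl_append, ihe]
    simp only [List.foldl_cons, List.foldl_nil, pyProduct, List.map_flatMap, List.map_map,
      Function.comp_def, List.zip_cons_cons, List.flatMap_cons, List.cons_append,
      List.nil_append]

-- ===== VERDICT (by name: the statement is the Claim_ definition above) =====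
theorem meta_paths_from_spec : Claim_equal_meta_paths_from := by
  intro el rls _hDom hPre
  unfold Spec_meta_paths_from meta_paths_from meta_paths_from_alt
  by_cases hemp : [] ∈ rls
  · have hany : rls.any (fun rl => rl.length == 0) = true := by
      simp only [List.any_eq_true]
      exact ⟨[], hemp, by simp⟩
    rw [hany, if_pos rfl, pyProduct_eq_nil_of_mem_nil hemp]
    simp
  · have hne : ∀ l ∈ rls, l ≠ [] := fun l hl h => hemp (h ▸ hl)
    have hany : rls.any (fun rl => rl.length == 0) = false := by
      simp only [List.any_eq_false]
      intro l hl
      simp [List.length_eq_zero_iff]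
      exact hne l hl
    have hb : rls.length + 1 ≤ el.length := hPre hne
    rw [hany, if_neg (by simp)]
    simp only [PySem.List.slice_from_one, ← List.drop_one]
    rw [tails_eq rls el hb, PySem.List.foldl_append_singleton_eq_map, List.map_map]
    apply List.map_congr_left
    intro c hc
    have hlen : c.length = rls.length := length_of_mem_pyProduct hc
    have := build_eq el c 0 [PySem.List.pyGetD el 0 0] (by omega)
    rw [show ((0 : Nat) : Int) = 0 by norm_num] at this
    simp [this, List.drop_one]
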